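-- pv_equiv track=rewrite | github.com/GillesArcas/Advent_of_Code | 2019/18.py | fill_dead_ends
-- ===== SOURCE A (Python) =====
-- DELTA_I = (0, -1, 0, 1)
--
-- DELTA_J = (1, 0, -1, 0)
--
-- def fill_dead_ends(data):
--     """
--     save time by erasing dead ends without keys or doors (ratio about 40s to 5s)
--     """
--     bouche = 1
--     while bouche:
--         bouche = 0
--         for i, line in enumerate(data[1:-1], 1):
--             for j, char in enumerate(line[1:-1], 1):
--                 if char == '.':
--                     nbwall = sum(data[i + DELTA_I[d]][j + DELTA_J[d]] == '#' for d in range(4))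
--                     if nbwall >= 3:
--                         data[i][j] = '#'
--                         bouche = 1
--     return data
-- ===== SOURCE B (Python) =====
-- def fill_dead_ends(data):
--     """
--     erase dead ends without keys or doors
--     (worklist version: only re-examine the neighbours of freshly filled cells)
--     """
--     n = len(data)
--
--     def walls(i, j):
--         return sum(data[i + di][j + dj] == '#'
--                    for di, dj in ((0, 1), (-1, 0), (0, -1), (1, 0)))
--
--     queue = [(i, j)
--              for i in range(1, n - 1)
--              for j in range(1, len(data[i]) - 1)
--              if data[i][j] == '.' and walls(i, j) >= 3]
--     head = 0
--     while head < len(queue):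
--         i, j = queue[head]
--         head += 1
--         if data[i][j] == '.' and walls(i, j) >= 3:
--             data[i][j] = '#'
--             for di, dj in ((0, 1), (-1, 0), (0, -1), (1, 0)):
--                 ni, nj = i + di, j + dj
--                 if 1 <= ni < n - 1 and 1 <= nj < len(data[ni]) - 1 and data[ni][nj] == '.':
--                     queue.append((ni, nj))
--     return data
-- ===== Notes on version B (the rewrite author's own statement) =====
-- stated objective: alternative
-- what changed: Replaces A's repeated full-grid passes (rescan every cell until a pass changes nothing) with a one-shot worklist: seed it with every current dead-end cell, and after filling a cell re-examine only its four neighbours.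
import Mathlib
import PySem

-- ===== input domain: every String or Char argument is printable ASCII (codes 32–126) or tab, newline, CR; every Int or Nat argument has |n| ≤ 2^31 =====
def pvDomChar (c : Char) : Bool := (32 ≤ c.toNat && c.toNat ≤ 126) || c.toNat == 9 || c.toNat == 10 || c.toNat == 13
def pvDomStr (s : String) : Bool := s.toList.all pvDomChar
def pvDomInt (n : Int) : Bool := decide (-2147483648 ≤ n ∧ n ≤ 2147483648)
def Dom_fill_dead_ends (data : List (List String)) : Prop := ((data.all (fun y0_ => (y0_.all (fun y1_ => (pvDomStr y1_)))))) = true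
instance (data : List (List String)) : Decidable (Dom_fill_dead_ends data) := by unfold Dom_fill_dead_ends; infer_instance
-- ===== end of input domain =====

-- B replaces A's repeated full-grid passes by a one-shot worklist that only revisits
-- neighbours of freshly filled cells (alternative algorithm; same fixpoint).
-- Both Pythons mutate `data` in place and return it; the ports thread the grid
-- functionally, so the equivalence proved here is about the returned grid (which is
-- the mutated `data` itself in both programs).

-- ===== PORT A =====
-- grid primitives shared by both ports (`data[i][j]` read/write; out-of-range reads
-- return "" — inside Pre_ every read the Pythons perform is in range)
def gcell (g : List (List String)) (i j : Nat) : String := (g.getD i []).getD j ""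

def gset (g : List (List String)) (i j : Nat) (v : String) : List (List String) :=
  g.set i ((g.getD i []).set j v)

def rowlen (g : List (List String)) (i : Nat) : Nat := (g.getD i []).length

-- the four (i+Δi, j+Δj) of A's DELTA_I/DELTA_J (same order as B's direction tuple);
-- only probed with i, j ≥ 1, where Nat subtraction agrees with Python's i-1 / j-1
def neighbors (i j : Nat) : List (Nat × Nat) := [(i, j+1), (i-1, j), (i, j-1), (i+1, j)]

-- `sum(data[i + DELTA_I[d]][j + DELTA_J[d]] == '#' for d in range(4))`
def nbwall (g : List (List String)) (i j : Nat) : Nat :=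
  ((neighbors i j).map (fun c => if gcell g c.1 c.2 = "#" then 1 else 0)).sum

-- number of '.' cells: the termination measure of both loops
def dots (g : List (List String)) : Nat := (g.map (fun r => r.count ".")).sum

-- body of A's inner loop at cell c (A's `char` is read from a row snapshot, but a pass
-- only ever writes at the cell it is visiting, so snapshot and live value coincide)
def stepA (st : List (List String) × Bool) (c : Nat × Nat) : List (List String) × Bool :=
  if gcell st.1 c.1 c.2 = "." then
    if 3 ≤ nbwall st.1 c.1 c.2 then (gset st.1 c.1 c.2 "#", true) else st
  else st

-- the (i, j) visited by `for i, line in enumerate(data[1:-1], 1): for j, char in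
-- enumerate(line[1:-1], 1)` (row lengths never change during a pass)
def interiorCells (g : List (List String)) : List (Nat × Nat) :=
  (List.range (g.length - 2)).flatMap (fun a =>
    (List.range (rowlen g (a+1) - 2)).map (fun b => (a+1, b+1)))

-- one iteration of A's `while` body; the Bool is `bouche`
def passA (g : List (List String)) : List (List String) × Bool :=
  (interiorCells g).foldl stepA (g, false)

-- termination facts the ports cite (a fill replaces an in-range '.' by '#')
theorem count_set_dot (l : List String) (j : Nat) (h : j < l.length) (hv : l[j] = ".") :
    (l.set j "#").count "." + 1 = l.count "." := by
  induction l generalizing j with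
  | nil => simp at h
  | cons a t ih =>
    cases j with
    | zero => simp_all
    | succ k =>
      simp only [List.set_cons_succ, List.count_cons]
      have := ih k (by simpa using h) (by simpa using hv)
      omega

theorem sum_set_nat (l : List Nat) (i : Nat) (h : i < l.length) (x : Nat) :
    (l.set i x).sum + l[i] = l.sum + x := by
  induction l generalizing i with
  | nil => simp at h
  | cons a t ih =>
    cases i with
    | zero => simp; omega
    | succ k =>
      simp only [List.set_cons_succ, List.sum_cons, List.getElem_cons_succ]
      have := ih k (by simpa using h)
      omega

theorem gcell_in_range {g : List (List String)} {i j : Nat} (h : gcell g i j = ".") :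
    i < g.length ∧ j < rowlen g i := by
  unfold gcell at h
  refine ⟨?_, ?_⟩
  · by_contra hi
    push_neg at hi
    rw [List.getD_eq_default _ _ hi] at h
    simp at h
  · by_contra hj
    push_neg at hj
    rw [List.getD_eq_default _ _ hj] at h
    simp at h

theorem dots_gset_lt {g : List (List String)} {i j : Nat} (h : gcell g i j = ".") :
    dots (gset g i j "#") < dots g := by
  obtain ⟨hi, hj⟩ := gcell_in_range h
  unfold gcell at h
  unfold rowlen at hj
  rw [List.getD_eq_getElem _ _ hi] at h hj
  rw [List.getD_eq_getElem _ _ hj] at h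
  unfold dots gset
  rw [List.getD_eq_getElem _ _ hi]
  rw [List.map_set]
  have hlen : i < (g.map (fun r => r.count ".")).length := by simpa using hi
  have hsum := sum_set_nat (g.map (fun r => r.count ".")) i hlen ((g[i].set j "#").count ".")
  have hcnt := count_set_dot g[i] j hj h
  simp only [List.getElem_map] at hsum
  omega

theorem foldl_stepA_dots (cells : List (Nat × Nat)) (st : List (List String) × Bool) :
    dots (cells.foldl stepA st).1 ≤ dots st.1 ∧
      ((cells.foldl stepA st).2 = true → st.2 = true ∨ dots (cells.foldl stepA st).1 < dots st.1) := by
  induction cells generalizing st with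
  | nil => exact ⟨le_refl _, fun h => Or.inl h⟩
  | cons c cs ih =>
    simp only [List.foldl_cons]
    have hstep : stepA st c = st ∨
        ((stepA st c).2 = true ∧ dots (stepA st c).1 < dots st.1) := by
      unfold stepA
      split_ifs with h1 h2
      · exact Or.inr ⟨rfl, dots_gset_lt h1⟩
      · exact Or.inl rfl
      · exact Or.inl rfl
    rcases hstep with heq | ⟨hb, hlt⟩
    · rw [heq]; exact ih st
    · obtain ⟨hle, himp⟩ := ih (stepA st c)
      refine ⟨by omega, fun _ => Or.inr ?_⟩
      omega

theorem passA_true_dots_lt (g : List (List String)) (h : (passA g).2 = true) :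
    dots (passA g).1 < dots g := by
  obtain ⟨hle, himp⟩ := foldl_stepA_dots (interiorCells g) (g, false)
  unfold passA at h ⊢
  rcases himp h with hf | hlt
  · simp at hf
  · exact hlt

-- A's `while bouche:` loop
def loopA (g : List (List String)) : List (List String) :=
  if h : (passA g).2 = true then loopA (passA g).1 else (passA g).1
termination_by dots g
decreasing_by exact passA_true_dots_lt g h

def fill_dead_ends (data : List (List String)) : List (List String) := loopA data

-- ===== PORT B =====
-- `1 <= i < n-1 and 1 <= j < len(data[i]) - 1` (Nat: for n ≤ 1 both sides are empty)
abbrev Interior (g : List (List String)) (i j : Nat) : Prop :=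
  1 ≤ i ∧ i < g.length - 1 ∧ 1 ≤ j ∧ j < rowlen g i - 1

-- B's initial comprehension: every interior '.' cell with ≥ 3 wall neighbours
def initQueue (g : List (List String)) : List (Nat × Nat) :=
  (List.range (g.length - 2)).flatMap (fun a =>
    (List.range (rowlen g (a+1) - 2)).filterMap (fun b =>
      if gcell g (a+1) (b+1) = "." ∧ 3 ≤ nbwall g (a+1) (b+1) then some (a+1, b+1) else none))

-- B's `while head < len(queue):` — the list is the unread tail of B's queue;
-- appends go to the back exactly as B's queue.append
def loopB (g : List (List String)) (q : List (Nat × Nat)) : List (List String) :=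
  match q with
  | [] => g
  | (i, j) :: rest =>
    if h : gcell g i j = "." ∧ 3 ≤ nbwall g i j then
      loopB (gset g i j "#")
        (rest ++ (neighbors i j).filter (fun c =>
          decide (Interior (gset g i j "#") c.1 c.2 ∧ gcell (gset g i j "#") c.1 c.2 = ".")))
    else loopB g rest
termination_by 5 * dots g + q.length
decreasing_by
· have hlt := dots_gset_lt (by exact h.1)
  have hle : (List.filter (fun c =>
      decide (Interior (gset g i j "#") c.1 c.2 ∧ gcell (gset g i j "#") c.1 c.2 = "."))
      [(i, j + 1), (i - 1, j), (i, j - 1), (i + 1, j)]).length ≤ 4 := by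
    simpa using List.length_filter_le _ [(i, j + 1), (i - 1, j), (i, j - 1), (i + 1, j)]
  have hle2 : (List.filter (fun c =>
      decide (Interior (gset g i j "#") c.1 c.2 ∧ gcell (gset g i j "#") c.1 c.2 = "."))
      (neighbors i j)).length ≤ 4 := hle
  simp only [List.length_append, List.length_cons]
  omega
· simp only [List.length_cons]
  omega

def fill_dead_ends_alt (data : List (List String)) : List (List String) :=
  loopB data (initQueue data)

-- ===== PRECONDITION & SPEC =====
-- Pre_ excludes exactly the inputs on which the Python A raises IndexError: ragged
-- grids where some interior '.' cell has a column index beyond the end of the row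
-- above or below it (the neighbour read data[i±1][j] then fails; '.' cells are never
-- created, so the first full pass already performs every such read).
def Pre_fill_dead_ends (data : List (List String)) : Prop :=
  ∀ i < data.length, ∀ j < rowlen data i,
    Interior data i j → gcell data i j = "." →
      j < rowlen data (i-1) ∧ j < rowlen data (i+1)

instance (data : List (List String)) : Decidable (Pre_fill_dead_ends data) := by
  unfold Pre_fill_dead_ends; infer_instance

def pvWitness_fill_dead_ends : List (List String) :=
  [["#", "#", "#", "#"], ["#", ".", ".", "#"], ["#", "#", "#", "#"]]

def Spec_fill_dead_ends (data : List (List String)) (out : List (List String)) : Prop := out = fill_dead_ends_alt data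
instance (data : List (List String)) (out : List (List String)) : Decidable (Spec_fill_dead_ends data out) := by unfold Spec_fill_dead_ends; infer_instance

-- ===== CLAIM (what is proved, stated in full; the proofs are below) =====
def Claim_equal_fill_dead_ends : Prop := ∀ (data : List (List String)), Dom_fill_dead_ends data → Pre_fill_dead_ends data → Spec_fill_dead_ends data (fill_dead_ends data)

-- ===== LEMMAS AND PROOFS =====

-- Abstract fill step: both programs only ever perform such steps, and both stop in a
-- grid that admits none; such a "saturated" grid reachable by steps is unique.
def StepF (g h : List (List String)) : Prop :=
  ∃ i j, Interior g i j ∧ gcell g i j = "." ∧ 3 ≤ nbwall g i j ∧ h = gset g i j "#"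

def StepsF (g h : List (List String)) : Prop := Relation.ReflTransGen StepF g h

def Saturated (g : List (List String)) : Prop :=
  ∀ a b, Interior g a b → gcell g a b = "." → nbwall g a b < 3

def ShapeEq (g h : List (List String)) : Prop :=
  g.length = h.length ∧ ∀ k, rowlen g k = rowlen h k

theorem shape_gset (g : List (List String)) (i j : Nat) (v : String) :
    ShapeEq g (gset g i j v) := by
  refine ⟨by simp [gset], fun k => ?_⟩
  unfold rowlen gset
  simp only [List.getD_eq_getElem?_getD]
  rw [List.getElem?_set]
  split_ifs with h1 h2
  · subst h1
    simp
  · subst h1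
    rw [List.getElem?_eq_none (by omega)]
  · rfl

theorem gcell_gset_ne {g : List (List String)} {i j a b : Nat} (v : String)
    (h : ¬(a = i ∧ b = j)) : gcell (gset g i j v) a b = gcell g a b := by
  unfold gcell gset
  simp only [List.getD_eq_getElem?_getD]
  rw [List.getElem?_set]
  split_ifs with h1 h2
  · subst h1
    have hb : j ≠ b := by tauto
    simp only [Option.getD_some]
    rw [List.getElem?_set_ne hb]
  · subst h1
    have hg : g[i]? = none := List.getElem?_eq_none (Nat.le_of_not_lt h2)
    rw [hg]
  · rfl

theorem gcell_gset_self {g : List (List String)} {i j : Nat} (v : String)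
    (hi : i < g.length) (hj : j < rowlen g i) : gcell (gset g i j v) i j = v := by
  unfold gcell gset
  unfold rowlen at hj
  simp only [List.getD_eq_getElem?_getD] at hj ⊢
  rw [List.getElem?_set_self (by simpa using hi)]
  simp only [Option.getD_some]
  rw [List.getElem?_set_self (by simpa using hj)]
  rfl

theorem step_shape {g h : List (List String)} (hs : StepF g h) : ShapeEq g h := by
  obtain ⟨i, j, _, _, _, rfl⟩ := hs
  exact shape_gset g i j "#"

theorem steps_shape {g h : List (List String)} (hs : StepsF g h) : ShapeEq g h := by
  induction hs with
  | refl => exact ⟨rfl, fun _ => rfl⟩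
  | tail _ hstep ih =>
    obtain ⟨h1, h2⟩ := ih
    obtain ⟨h3, h4⟩ := step_shape hstep
    exact ⟨h1.trans h3, fun k => (h2 k).trans (h4 k)⟩

theorem step_cell {g h : List (List String)} (hs : StepF g h) (a b : Nat) :
    gcell h a b = gcell g a b ∨ (gcell g a b = "." ∧ gcell h a b = "#") := by
  obtain ⟨i, j, _, hdot, _, rfl⟩ := hs
  by_cases hab : a = i ∧ b = j
  · obtain ⟨rfl, rfl⟩ := hab
    obtain ⟨hi, hj⟩ := gcell_in_range hdot
    exact Or.inr ⟨hdot, gcell_gset_self "#" hi hj⟩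
  · exact Or.inl (gcell_gset_ne "#" hab)

theorem steps_hash {g h : List (List String)} (hs : StepsF g h) (a b : Nat)
    (hc : gcell g a b = "#") : gcell h a b = "#" := by
  induction hs with
  | refl => exact hc
  | tail _ hstep ih =>
    rcases step_cell hstep a b with heq | ⟨_, hh⟩
    · rw [heq]; exact ih
    · exact hh

theorem steps_unchanged {g h : List (List String)} (hs : StepsF g h) (a b : Nat)
    (hc : gcell h a b ≠ "#") : gcell h a b = gcell g a b := by
  induction hs with
  | refl => rfl
  | tail _ hstep ih =>
    rcases step_cell hstep a b with heq | ⟨_, hh⟩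
    · rw [heq] at hc ⊢; exact ih hc
    · exact absurd hh hc

theorem steps_dot {g h : List (List String)} (hs : StepsF g h) (a b : Nat)
    (hc : gcell h a b = ".") : gcell g a b = "." := by
  have : gcell h a b ≠ "#" := by rw [hc]; decide
  rw [← steps_unchanged hs a b this]; exact hc

theorem interior_transport {g h : List (List String)} (hs : ShapeEq g h) (i j : Nat) :
    Interior g i j ↔ Interior h i j := by
  unfold Interior
  rw [hs.1, hs.2 i]

theorem nbwall_mono (g h : List (List String)) (i j : Nat)
    (hm : ∀ a b, gcell g a b = "#" → gcell h a b = "#") :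
    nbwall g i j ≤ nbwall h i j := by
  have key : ∀ p q, (if gcell g p q = "#" then (1:Nat) else 0) ≤ (if gcell h p q = "#" then 1 else 0) := by
    intro p q
    split_ifs with h1 h2
    · omega
    · exact absurd (hm p q h1) h2
    · omega
    · omega
  unfold nbwall neighbors
  simp only [List.map_cons, List.map_nil, List.sum_cons, List.sum_nil]
  have k1 := key i (j+1); have k2 := key (i-1) j; have k3 := key i (j-1); have k4 := key (i+1) j
  omega

theorem nbwall_congr (g h : List (List String)) (i j : Nat)
    (hc : ∀ c ∈ neighbors i j, gcell g c.1 c.2 = gcell h c.1 c.2) :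
    nbwall g i j = nbwall h i j := by
  unfold nbwall
  congr 1
  apply List.map_congr_left
  intro c hcmem
  rw [hc c hcmem]

theorem neighbor_symm {i j a b : Nat} (ha : 1 ≤ a) (hb : 1 ≤ b)
    (h : (i, j) ∈ neighbors a b) : (a, b) ∈ neighbors i j := by
  simp only [neighbors, List.mem_cons, List.not_mem_nil, or_false, Prod.mk.injEq] at h ⊢
  rcases h with ⟨h1, h2⟩ | ⟨h1, h2⟩ | ⟨h1, h2⟩ | ⟨h1, h2⟩ <;> omega

-- any '#' produced on one maximal path is also '#' in any other saturated endpoint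
theorem steps_incl {g g1 g2 : List (List String)} (h1 : StepsF g g1) (h2 : StepsF g g2)
    (hsat : Saturated g2) : ∀ a b, gcell g1 a b = "#" → gcell g2 a b = "#" := by
  induction h1 with
  | refl => exact fun a b hc => steps_hash h2 a b hc
  | @tail m m' hgm hstep ih =>
    intro a b hc
    obtain ⟨i, j, hint, hdot, hwall, rfl⟩ := hstep
    by_cases hab : a = i ∧ b = j
    · obtain ⟨rfl, rfl⟩ := hab
      by_contra hne
      -- the cell is still '.' in g2, but all ≥3 wall neighbours transfer: not saturated
      have hga : gcell g a b = "." := steps_dot hgm a b hdot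
      have hg2 : gcell g2 a b = gcell g a b := by
        apply steps_unchanged h2 a b
        intro hcontra; exact hne hcontra
      rw [hga] at hg2
      have hint2 : Interior g2 a b := by
        rw [← interior_transport (steps_shape h2) a b,
            interior_transport (steps_shape hgm) a b]
        exact hint
      have hmono : nbwall m a b ≤ nbwall g2 a b :=
        nbwall_mono m g2 a b (fun p q hp => ih p q hp)
      have := hsat a b hint2 hg2
      omega
    · rw [gcell_gset_ne "#" hab] at hc
      exact ih a b hc

theorem grid_eq {g1 g2 : List (List String)} (hs : ShapeEq g1 g2)
    (hc : ∀ a b, gcell g1 a b = gcell g2 a b) : g1 = g2 := by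
  apply List.ext_getElem hs.1
  intro i hi1 hi2
  apply List.ext_getElem
  · have := hs.2 i
    unfold rowlen at this
    rwa [List.getD_eq_getElem _ _ hi1, List.getD_eq_getElem _ _ hi2] at this
  · intro j hj1 hj2
    have := hc i j
    unfold gcell at this
    rwa [List.getD_eq_getElem _ _ hi1, List.getD_eq_getElem _ _ hi2,
         List.getD_eq_getElem _ _ hj1, List.getD_eq_getElem _ _ hj2] at this

theorem saturated_unique {g g1 g2 : List (List String)}
    (h1 : StepsF g g1) (hs1 : Saturated g1) (h2 : StepsF g g2) (hs2 : Saturated g2) :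
    g1 = g2 := by
  have incl12 := steps_incl h1 h2 hs2
  have incl21 := steps_incl h2 h1 hs1
  apply grid_eq
  · obtain ⟨a1, b1⟩ := steps_shape h1
    obtain ⟨a2, b2⟩ := steps_shape h2
    exact ⟨a1.symm.trans a2, fun k => (b1 k).symm.trans (b2 k)⟩
  · intro a b
    by_cases hc1 : gcell g1 a b = "#"
    · rw [hc1, incl12 a b hc1]
    · have e1 : gcell g1 a b = gcell g a b := steps_unchanged h1 a b hc1
      by_cases hc2 : gcell g2 a b = "#"
      · exact absurd (incl21 a b hc2) hc1
      · have e2 : gcell g2 a b = gcell g a b := steps_unchanged h2 a b hc2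
        rw [e1, e2]

-- ===== A's loop reaches a saturated grid by fill steps =====

theorem mem_interiorCells {g : List (List String)} {c : Nat × Nat} :
    c ∈ interiorCells g ↔ Interior g c.1 c.2 := by
  obtain ⟨c1, c2⟩ := c
  simp only [interiorCells, List.mem_flatMap, List.mem_map, List.mem_range, Interior,
    Prod.mk.injEq]
  constructor
  · rintro ⟨a, ha, b, hb, rfl, rfl⟩
    refine ⟨by omega, by omega, by omega, by omega⟩
  · rintro ⟨h1, h2, h3, h4⟩
    refine ⟨c1 - 1, by omega, c2 - 1, ?_, by omega, by omega⟩
    have e : c1 - 1 + 1 = c1 := by omega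
    rw [e]
    omega

theorem foldl_stepA_b_mono (cells : List (Nat × Nat)) (st : List (List String) × Bool)
    (h : st.2 = true) : (cells.foldl stepA st).2 = true := by
  induction cells generalizing st with
  | nil => exact h
  | cons c cs ih =>
    simp only [List.foldl_cons]
    apply ih
    unfold stepA
    split_ifs <;> simp [h]

theorem foldl_stepA_props (g0 : List (List String)) (cells : List (Nat × Nat))
    (st : List (List String) × Bool)
    (hc : ∀ c ∈ cells, Interior g0 c.1 c.2) (hsh : ShapeEq g0 st.1) :
    StepsF st.1 (cells.foldl stepA st).1 ∧
      ((cells.foldl stepA st).2 = false →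
        cells.foldl stepA st = st ∧
          ∀ c ∈ cells, ¬(gcell st.1 c.1 c.2 = "." ∧ 3 ≤ nbwall st.1 c.1 c.2)) := by
  induction cells generalizing st with
  | nil => exact ⟨Relation.ReflTransGen.refl, fun _ => ⟨rfl, by simp⟩⟩
  | cons c cs ih =>
    simp only [List.foldl_cons]
    by_cases hcond : gcell st.1 c.1 c.2 = "." ∧ 3 ≤ nbwall st.1 c.1 c.2
    · have hstep : stepA st c = (gset st.1 c.1 c.2 "#", true) := by
        unfold stepA
        rw [if_pos hcond.1, if_pos hcond.2]
      have hint : Interior st.1 c.1 c.2 :=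
        (interior_transport hsh c.1 c.2).mp (hc c (by simp))
      have hS : StepF st.1 (gset st.1 c.1 c.2 "#") :=
        ⟨c.1, c.2, hint, hcond.1, hcond.2, rfl⟩
      have hsh' : ShapeEq g0 (stepA st c).1 := by
        rw [hstep]
        obtain ⟨a1, a2⟩ := hsh
        obtain ⟨b1, b2⟩ := shape_gset st.1 c.1 c.2 "#"
        exact ⟨a1.trans b1, fun k => (a2 k).trans (b2 k)⟩
      obtain ⟨hsteps, _⟩ := ih (stepA st c) (fun x hx => hc x (by simp [hx])) hsh'
      constructor
      · refine Relation.ReflTransGen.trans ?_ hsteps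
        rw [hstep]
        exact Relation.ReflTransGen.single hS
      · intro hfalse
        have : (cs.foldl stepA (stepA st c)).2 = true := by
          apply foldl_stepA_b_mono
          rw [hstep]
        rw [hfalse] at this
        exact absurd this (by simp)
    · have hstep : stepA st c = st := by
        unfold stepA
        split_ifs with h1 h2
        · exact absurd ⟨h1, h2⟩ hcond
        · rfl
        · rfl
      rw [hstep]
      obtain ⟨hsteps, hfalse⟩ := ih st (fun x hx => hc x (by simp [hx])) hsh
      refine ⟨hsteps, fun hf => ?_⟩
      obtain ⟨heq, hnone⟩ := hfalse hf
      refine ⟨heq, fun x hx => ?_⟩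
      rcases List.mem_cons.mp hx with rfl | hmem
      · exact hcond
      · exact hnone x hmem

theorem passA_props (g : List (List String)) :
    StepsF g (passA g).1 ∧ ((passA g).2 = false → (passA g).1 = g ∧ Saturated g) := by
  have h := foldl_stepA_props g (interiorCells g) (g, false)
    (fun c hc => mem_interiorCells.mp hc) ⟨rfl, fun _ => rfl⟩
  obtain ⟨hsteps, hfalse⟩ := h
  refine ⟨hsteps, fun hf => ?_⟩
  obtain ⟨heq, hnone⟩ := hfalse hf
  unfold passA
  constructor
  · rw [heq]
  · intro a b hint hdot
    have := hnone (a, b) (mem_interiorCells.mpr hint)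
    simp only [not_and, not_le] at this
    exact this hdot

theorem loopA_props (g : List (List String)) :
    StepsF g (loopA g) ∧ Saturated (loopA g) := by
  unfold loopA
  split_ifs with h
  · obtain ⟨hsteps, _⟩ := passA_props g
    obtain ⟨ih1, ih2⟩ := loopA_props (passA g).1
    exact ⟨Relation.ReflTransGen.trans hsteps ih1, ih2⟩
  · obtain ⟨_, hfalse⟩ := passA_props g
    obtain ⟨heq, hsat⟩ := hfalse (by simpa using h)
    rw [heq]
    exact ⟨Relation.ReflTransGen.refl, hsat⟩
termination_by dots g
decreasing_by exact passA_true_dots_lt g h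

-- ===== B's worklist reaches a saturated grid by fill steps =====

theorem mem_initQueue {g : List (List String)} {c : Nat × Nat} :
    c ∈ initQueue g ↔
      Interior g c.1 c.2 ∧ gcell g c.1 c.2 = "." ∧ 3 ≤ nbwall g c.1 c.2 := by
  obtain ⟨c1, c2⟩ := c
  simp only [initQueue, List.mem_flatMap, List.mem_filterMap, List.mem_range, Interior]
  constructor
  · rintro ⟨a, ha, b, hb, hsome⟩
    by_cases hcond : gcell g (a+1) (b+1) = "." ∧ 3 ≤ nbwall g (a+1) (b+1)
    · rw [if_pos hcond] at hsome
      simp only [Option.some.injEq, Prod.mk.injEq] at hsome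
      obtain ⟨rfl, rfl⟩ := hsome
      exact ⟨⟨by omega, by omega, by omega, by omega⟩, hcond.1, hcond.2⟩
    · rw [if_neg hcond] at hsome
      simp at hsome
  · rintro ⟨⟨h1, h2, h3, h4⟩, hdot, hwall⟩
    refine ⟨c1 - 1, by omega, c2 - 1, ?_⟩
    have e1 : c1 - 1 + 1 = c1 := by omega
    have e2 : c2 - 1 + 1 = c2 := by omega
    rw [e1, e2]
    exact ⟨by omega, by rw [if_pos ⟨hdot, hwall⟩]⟩

theorem loopB_props (g : List (List String)) (q : List (Nat × Nat))
    (hq : ∀ c ∈ q, Interior g c.1 c.2)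
    (hcomp : ∀ a b, Interior g a b → gcell g a b = "." → 3 ≤ nbwall g a b → (a, b) ∈ q) :
    StepsF g (loopB g q) ∧ Saturated (loopB g q) := by
  match q with
  | [] =>
    rw [loopB]
    refine ⟨Relation.ReflTransGen.refl, fun a b hint hdot => ?_⟩
    by_contra hw
    push_neg at hw
    exact absurd (hcomp a b hint hdot hw) (by simp)
  | (i, j) :: rest =>
    rw [loopB]
    split_ifs with hcond
    · -- fill step
      obtain ⟨hdot, hwall⟩ := hcond
      set g' := gset g i j "#" with hg'
      have hint : Interior g i j := hq (i, j) (by simp)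
      have hS : StepF g g' := ⟨i, j, hint, hdot, hwall, rfl⟩
      have hsh : ShapeEq g g' := step_shape hS
      obtain ⟨hi, hj⟩ := gcell_in_range hdot
      have hself : gcell g' i j = "#" := gcell_gset_self "#" hi hj
      set pushes := (neighbors i j).filter (fun c =>
          decide (Interior g' c.1 c.2 ∧ gcell g' c.1 c.2 = ".")) with hpushes
      have hq' : ∀ c ∈ rest ++ pushes, Interior g' c.1 c.2 := by
        intro c hc
        rcases List.mem_append.mp hc with hm | hm
        · exact (interior_transport hsh c.1 c.2).mp (hq c (by simp [hm]))
        · have := List.of_mem_filter hm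
          simp only [decide_eq_true_eq] at this
          exact this.1
      have hcomp' : ∀ a b, Interior g' a b → gcell g' a b = "." → 3 ≤ nbwall g' a b →
          (a, b) ∈ rest ++ pushes := by
        intro a b hint' hdot' hwall'
        have hab : ¬(a = i ∧ b = j) := by
          rintro ⟨rfl, rfl⟩
          rw [hself] at hdot'
          exact absurd hdot' (by decide)
        have hcell : gcell g a b = gcell g' a b := (gcell_gset_ne "#" hab).symm
        by_cases hnb : (i, j) ∈ neighbors a b
        · -- a pushed neighbour
          apply List.mem_append.mpr
          right
          apply List.mem_filter.mpr
          refine ⟨neighbor_symm hint'.1 hint'.2.2.1 hnb, ?_⟩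
          simp only [decide_eq_true_eq]
          exact ⟨hint', hdot'⟩
        · -- already valid before the fill, hence in the old queue
          have hwg : nbwall g a b = nbwall g' a b := by
            apply nbwall_congr
            intro c hcmem
            apply (gcell_gset_ne "#" ?_).symm
            rintro ⟨rfl, rfl⟩
            exact hnb (by simpa using hcmem)
          have hintg : Interior g a b := (interior_transport hsh a b).mpr hint'
          have hmem := hcomp a b hintg (by rw [hcell]; exact hdot') (by omega)
          rcases List.mem_cons.mp hmem with heq | hm
          · exact absurd (by exact ⟨congrArg Prod.fst heq, congrArg Prod.snd heq⟩) hab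
          · exact List.mem_append.mpr (Or.inl hm)
      obtain ⟨hsteps, hsat⟩ := loopB_props g' (rest ++ pushes) hq' hcomp'
      exact ⟨Relation.ReflTransGen.trans (Relation.ReflTransGen.single hS) hsteps, hsat⟩
    · -- stale queue entry: skip
      apply loopB_props g rest (fun c hc => hq c (by simp [hc]))
      intro a b hint hdot hwall
      have hmem := hcomp a b hint hdot hwall
      rcases List.mem_cons.mp hmem with heq | hm
      · exfalso
        apply hcond
        have h1 : a = i := congrArg Prod.fst heq
        have h2 : b = j := congrArg Prod.snd heq
        rw [← h1, ← h2]
        exact ⟨hdot, hwall⟩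
      · exact hm
termination_by 5 * dots g + q.length
decreasing_by
· have hlt := dots_gset_lt hdot
  have hle : (List.filter (fun c =>
      decide (Interior (gset g i j "#") c.1 c.2 ∧ gcell (gset g i j "#") c.1 c.2 = "."))
      [(i, j + 1), (i - 1, j), (i, j - 1), (i + 1, j)]).length ≤ 4 := by
    simpa using List.length_filter_le _ [(i, j + 1), (i - 1, j), (i, j - 1), (i + 1, j)]
  have hle2 : (List.filter (fun c =>
      decide (Interior (gset g i j "#") c.1 c.2 ∧ gcell (gset g i j "#") c.1 c.2 = "."))
      (neighbors i j)).length ≤ 4 := hle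
  simp only [List.length_append, List.length_cons]
  omega
· simp only [List.length_cons]
  omega

theorem alt_props (data : List (List String)) :
    StepsF data (fill_dead_ends_alt data) ∧ Saturated (fill_dead_ends_alt data) := by
  unfold fill_dead_ends_alt
  apply loopB_props
  · exact fun c hc => (mem_initQueue.mp hc).1
  · exact fun a b h1 h2 h3 => mem_initQueue.mpr ⟨h1, h2, h3⟩

-- ===== VERDICT (by name: the statement is the Claim_ definition above) =====
theorem fill_dead_ends_spec : Claim_equal_fill_dead_ends := by
  intro data _ _
  unfold Spec_fill_dead_ends fill_dead_ends
  obtain ⟨hA1, hA2⟩ := loopA_props data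
  obtain ⟨hB1, hB2⟩ := alt_props data
  exact saturated_unique hA1 hA2 hB1 hB2
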